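-- pv_equiv track=rewrite | github.com/CorDub/Diablo-4-DPS-meter | post_processing.py | change_obvious_letters_to_numbers
-- ===== SOURCE A (Python) =====
-- def change_obvious_letters_to_numbers(data_extract):
--     for i, x in enumerate(data_extract):
--         x = x.replace('S', '5').replace('s', '5')
--         x = x.replace('L', '1').replace('l', '1').replace('I', '1').replace('i', '1')
--         x = x.replace('O', '0').replace('o', '0').replace('u', '0')
--         x = x.replace('B', '8')
--         x = x.replace('G', '8')
--         data_extract[i] = x
--     return data_extract
-- ===== SOURCE B (Python) =====
-- def change_obvious_letters_to_numbers(data_extract):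
--     out = []
--     for x in data_extract:
--         buf = []
--         for c in x:
--             if c in 'Ss':
--                 buf.append('5')
--             elif c in 'LlIi':
--                 buf.append('1')
--             elif c in 'Oou':
--                 buf.append('0')
--             elif c in 'BG':
--                 buf.append('8')
--             else:
--                 buf.append(c)
--         out.append(''.join(buf))
--     data_extract[:] = out
--     return data_extract
-- ===== Notes on version B (the rewrite author's own statement) =====
-- stated objective: alternative
-- what changed: Instead of A's eleven sequential whole-string scan-and-replace passes (each allocating an intermediate string), B makes one left-to-right pass per string, classifying each character by confusable-group membership (Ss/LlIi/Oou/BG) into a buffer joined once.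
import Mathlib
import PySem

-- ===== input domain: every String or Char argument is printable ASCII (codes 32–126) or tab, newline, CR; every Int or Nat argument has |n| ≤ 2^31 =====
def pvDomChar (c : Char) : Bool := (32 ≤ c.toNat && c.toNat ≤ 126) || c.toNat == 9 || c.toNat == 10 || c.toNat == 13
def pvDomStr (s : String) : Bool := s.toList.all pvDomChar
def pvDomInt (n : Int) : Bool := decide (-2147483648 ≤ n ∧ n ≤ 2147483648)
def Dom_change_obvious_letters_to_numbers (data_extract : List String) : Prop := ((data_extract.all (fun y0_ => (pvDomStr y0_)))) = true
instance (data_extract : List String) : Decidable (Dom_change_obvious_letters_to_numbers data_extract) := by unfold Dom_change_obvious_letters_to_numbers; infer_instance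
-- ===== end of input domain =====

-- B replaces A's eleven sequential whole-string scan-and-replace passes with one
-- left-to-right character pass per string, classifying each character by
-- confusable-group membership into a buffer joined once; equivalence is about the
-- return value (both Pythons also mutate the argument list in place identically).

-- ===== PORT A =====
-- one iteration of A's loop body: the chain of eleven .replace calls
def pvReplA (x : String) : String :=
  let x := PySem.Str.replace x "S" "5"
  let x := PySem.Str.replace x "s" "5"
  let x := PySem.Str.replace x "L" "1"
  let x := PySem.Str.replace x "l" "1"
  let x := PySem.Str.replace x "I" "1"
  let x := PySem.Str.replace x "i" "1"
  let x := PySem.Str.replace x "O" "0"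
  let x := PySem.Str.replace x "o" "0"
  let x := PySem.Str.replace x "u" "0"
  let x := PySem.Str.replace x "B" "8"
  let x := PySem.Str.replace x "G" "8"
  x

def change_obvious_letters_to_numbers (data_extract : List String) : List String :=
  data_extract.map pvReplA

-- ===== PORT B =====
-- Source B's inner loop: append each character's digit (or itself) to buf
def pvBufStep (buf : List Char) (c : Char) : List Char :=
  if "Ss".toList.contains c then buf ++ ['5']
  else if "LlIi".toList.contains c then buf ++ ['1']
  else if "Oou".toList.contains c then buf ++ ['0']
  else if "BG".toList.contains c then buf ++ ['8']
  else buf ++ [c]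

-- one string: buf built left-to-right, then ''.join(buf)
def pvFixB (x : String) : String :=
  String.ofList (x.toList.foldl pvBufStep [])

def change_obvious_letters_to_numbers_alt (data_extract : List String) : List String :=
  data_extract.foldl (fun out x => out ++ [pvFixB x]) []

-- ===== PRECONDITION & SPEC =====
def Spec_change_obvious_letters_to_numbers (data_extract : List String) (out : List String) : Prop := out = change_obvious_letters_to_numbers_alt data_extract
instance (data_extract : List String) (out : List String) : Decidable (Spec_change_obvious_letters_to_numbers data_extract out) := by unfold Spec_change_obvious_letters_to_numbers; infer_instance

-- ===== CLAIM (what is proved, stated in full; the proofs are below) =====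
def Claim_equal_change_obvious_letters_to_numbers : Prop := ∀ (data_extract : List String), Dom_change_obvious_letters_to_numbers data_extract → Spec_change_obvious_letters_to_numbers data_extract (change_obvious_letters_to_numbers data_extract)

-- ===== LEMMAS AND PROOFS =====
-- the per-character function B realizes
def pvGroup (c : Char) : Char :=
  if "Ss".toList.contains c then '5'
  else if "LlIi".toList.contains c then '1'
  else if "Oou".toList.contains c then '0'
  else if "BG".toList.contains c then '8'
  else c

theorem pv_bufStep_eq (buf : List Char) (c : Char) :
    pvBufStep buf c = buf ++ [pvGroup c] := by
  unfold pvBufStep pvGroup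
  split_ifs <;> rfl

theorem pv_foldl_buf (l : List Char) : ∀ acc, l.foldl pvBufStep acc = acc ++ l.map pvGroup := by
  induction l with
  | nil => simp
  | cons c t ih =>
      intro acc
      simp only [List.foldl_cons, List.map_cons, pv_bufStep_eq, ih]
      simp

theorem pv_fixB_eq (x : String) : pvFixB x = String.ofList (x.toList.map pvGroup) := by
  unfold pvFixB
  rw [pv_foldl_buf x.toList []]
  rfl

theorem pv_foldl_out (l : List String) : ∀ acc,
    l.foldl (fun out x => out ++ [pvFixB x]) acc = acc ++ l.map pvFixB := by
  induction l with
  | nil => simp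
  | cons x t ih =>
      intro acc
      simp only [List.foldl_cons, List.map_cons, ih]
      simp

theorem pv_go_single (c d : Char) (l : List Char) :
    ∀ (fuel : Nat) (acc : List Char), l.length ≤ fuel →
    PySem.Chars.replace.go [c] [d] fuel l acc
      = acc.reverse ++ l.map (fun a => if a = c then d else a) := by
  induction l with
  | nil =>
      intro fuel acc _
      cases fuel <;> rw [PySem.Chars.replace.go.eq_def] <;> simp
  | cons h t ih =>
      intro fuel acc hle
      cases fuel with
      | zero => simp at hle
      | succ n =>
        rw [PySem.Chars.replace.go.eq_def]
        simp only []
        by_cases hc : h = c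
        · subst hc
          rw [if_pos (by simp [List.isPrefixOf])]
          simp only [List.length_cons, List.length_nil, List.drop_succ_cons, List.drop_zero, List.reverse_cons, List.reverse_nil, List.nil_append]
          rw [show ([d] ++ acc) = d :: acc from rfl, ih n (d :: acc) (by simpa using hle)]
          simp
        · rw [if_neg (by simp [List.isPrefixOf, beq_iff_eq]; intro h'; exact hc h'.symm)]
          rw [ih n (h :: acc) (by simpa using hle)]
          simp [hc]

theorem pv_replace_single (c d : Char) (l : List Char) :
    PySem.Chars.replace l [c] [d] = l.map (fun a => if a = c then d else a) := by
  have h : ([c] : List Char).isEmpty = false := rfl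
  simp only [PySem.Chars.replace, h, Bool.false_eq_true, if_false]
  exact pv_go_single c d l l.length [] le_rfl

theorem pv_str_replace_single (x : String) (c d : Char) :
    (PySem.Str.replace x (String.ofList [c]) (String.ofList [d])).toList
      = x.toList.map (fun a => if a = c then d else a) := by
  rw [PySem.Str.toList_replace]
  simp [pv_replace_single]

theorem pv_chain_eq_group (a : Char) :
    (fun b => if b = 'G' then '8' else b)
    ((fun b => if b = 'B' then '8' else b)
    ((fun b => if b = 'u' then '0' else b)
    ((fun b => if b = 'o' then '0' else b)
    ((fun b => if b = 'O' then '0' else b)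
    ((fun b => if b = 'i' then '1' else b)
    ((fun b => if b = 'I' then '1' else b)
    ((fun b => if b = 'l' then '1' else b)
    ((fun b => if b = 'L' then '1' else b)
    ((fun b => if b = 's' then '5' else b)
    ((fun b => if b = 'S' then '5' else b) a)))))))))) = pvGroup a := by
  unfold pvGroup
  by_cases h1 : a = 'S'; · subst h1; decide
  by_cases h2 : a = 's'; · subst h2; decide
  by_cases h3 : a = 'L'; · subst h3; decide
  by_cases h4 : a = 'l'; · subst h4; decide
  by_cases h5 : a = 'I'; · subst h5; decide
  by_cases h6 : a = 'i'; · subst h6; decide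
  by_cases h7 : a = 'O'; · subst h7; decide
  by_cases h8 : a = 'o'; · subst h8; decide
  by_cases h9 : a = 'u'; · subst h9; decide
  by_cases h10 : a = 'B'; · subst h10; decide
  by_cases h11 : a = 'G'; · subst h11; decide
  simp only [h1, h2, h3, h4, h5, h6, h7, h8, h9, h10, h11, if_false]
  have hSs : "Ss".toList.contains a = false := by
    simp [List.contains_eq_mem, h1, h2]
  have hLl : "LlIi".toList.contains a = false := by
    simp [List.contains_eq_mem, h3, h4, h5, h6]
  have hOo : "Oou".toList.contains a = false := by
    simp [List.contains_eq_mem, h7, h8, h9]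
  have hBG : "BG".toList.contains a = false := by
    simp [List.contains_eq_mem, h10, h11]
  rw [hSs, hLl, hOo, hBG]
  rfl

theorem pv_maps (l : List Char) : List.map (fun a => if a = 'G' then '8' else a) (List.map (fun a => if a = 'B' then '8' else a) (List.map (fun a => if a = 'u' then '0' else a) (List.map (fun a => if a = 'o' then '0' else a) (List.map (fun a => if a = 'O' then '0' else a) (List.map (fun a => if a = 'i' then '1' else a) (List.map (fun a => if a = 'I' then '1' else a) (List.map (fun a => if a = 'l' then '1' else a) (List.map (fun a => if a = 'L' then '1' else a) (List.map (fun a => if a = 's' then '5' else a) (List.map (fun a => if a = 'S' then '5' else a) (l))))))))))) = l.map pvGroup := by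
  induction l with
  | nil => simp
  | cons a t ih =>
      simp only [List.map_cons]
      rw [ih]
      exact congrArg (fun h => h :: t.map pvGroup) (pv_chain_eq_group a)

theorem pv_replA_eq_fixB (x : String) : pvReplA x = pvFixB x := by
  rw [pv_fixB_eq]
  apply String.toList_inj.mp
  unfold pvReplA
  rw [pv_str_replace_single, pv_str_replace_single, pv_str_replace_single,
      pv_str_replace_single, pv_str_replace_single, pv_str_replace_single,
      pv_str_replace_single, pv_str_replace_single, pv_str_replace_single,
      pv_str_replace_single, pv_str_replace_single,
      String.toList_ofList, pv_maps]

-- ===== VERDICT (by name: the statement is the Claim_ definition above) =====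
theorem change_obvious_letters_to_numbers_spec : Claim_equal_change_obvious_letters_to_numbers := by
  intro l _
  unfold Spec_change_obvious_letters_to_numbers change_obvious_letters_to_numbers
    change_obvious_letters_to_numbers_alt
  rw [pv_foldl_out l []]
  simpa using List.map_congr_left (fun x _ => pv_replA_eq_fixB x)
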